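-- pv_equiv track=rewrite | github.com/37-AN/43V3RR | backend/app/ai/filesystem_sync_agent.py | _guess_records_status
-- ===== SOURCE A (Python) =====
-- from typing import Any, Dict, List
--
-- def _guess_records_status(files: List[str]) -> str:
--     lowered = [f.lower() for f in files]
--     if any("master" in f for f in lowered):
--         return "ready_for_release"
--     if any("mix" in f for f in lowered):
--         return "mix"
--     if any(f.endswith((".wav", ".mp3", ".flac")) for f in lowered):
--         return "production"
--     return "idea"
-- ===== SOURCE B (Python) =====
-- def _guess_records_status(files):
--     has_mix = False
--     has_audio = False
--     for f in files:
--         g = f.lower()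
--         if "master" in g:
--             return "ready_for_release"
--         if "mix" in g:
--             has_mix = True
--         elif g.endswith((".wav", ".mp3", ".flac")):
--             has_audio = True
--     if has_mix:
--         return "mix"
--     if has_audio:
--         return "production"
--     return "idea"
-- ===== Notes on version B (the rewrite author's own statement) =====
-- stated objective: alternative
-- what changed: Replaces the three full scans over a pre-lowered copy of the list with a single pass that lowercases each name once, returns immediately on 'master', and collects mix/audio flags decided by priority after the loop.
import Mathlib
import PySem

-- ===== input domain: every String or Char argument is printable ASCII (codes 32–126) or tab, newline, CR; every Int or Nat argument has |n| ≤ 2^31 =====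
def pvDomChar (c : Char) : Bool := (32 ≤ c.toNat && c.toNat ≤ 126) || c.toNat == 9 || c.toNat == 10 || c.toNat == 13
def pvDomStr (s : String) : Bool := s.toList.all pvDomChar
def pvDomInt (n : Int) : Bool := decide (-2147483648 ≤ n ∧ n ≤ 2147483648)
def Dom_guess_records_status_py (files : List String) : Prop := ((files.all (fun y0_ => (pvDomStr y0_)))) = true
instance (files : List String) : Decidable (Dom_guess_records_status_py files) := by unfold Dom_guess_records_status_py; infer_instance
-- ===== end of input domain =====

-- B replaces A's three full scans over a pre-lowered list with a single flag-collecting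
-- pass (early return on "master", priority decision after the loop); objective: alternative.


-- ===== PORT A =====
def guess_records_status_py (files : List String) : String :=
  let lowered := files.map (fun f => PySem.Str.lower f)
  if lowered.any (fun f => PySem.Str.isIn "master" f) then "ready_for_release"
  else if lowered.any (fun f => PySem.Str.isIn "mix" f) then "mix"
  else if lowered.any (fun f => PySem.Str.endswith f ".wav" || PySem.Str.endswith f ".mp3" ||
      PySem.Str.endswith f ".flac") then "production"
  else "idea"

-- ===== PORT B =====
def guessLoop (files : List String) (hasMix hasAudio : Bool) : String :=
  match files with
  | [] =>
    if hasMix then "mix"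
    else if hasAudio then "production"
    else "idea"
  | f :: rest =>
    -- g = f.lower(); inlined (referential transparency)
    if PySem.Str.isIn "master" (PySem.Str.lower f) then "ready_for_release"
    else if PySem.Str.isIn "mix" (PySem.Str.lower f) then guessLoop rest true hasAudio
    else if PySem.Str.endswith (PySem.Str.lower f) ".wav" || PySem.Str.endswith (PySem.Str.lower f) ".mp3" ||
        PySem.Str.endswith (PySem.Str.lower f) ".flac" then guessLoop rest hasMix true
    else guessLoop rest hasMix hasAudio

def guess_records_status_py_alt (files : List String) : String :=
  guessLoop files false false

-- ===== PRECONDITION & SPEC =====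
def Spec_guess_records_status_py (files : List String) (out : String) : Prop := out = guess_records_status_py_alt files
instance (files : List String) (out : String) : Decidable (Spec_guess_records_status_py files out) := by unfold Spec_guess_records_status_py; infer_instance

-- ===== CLAIM (what is proved, stated in full; the proofs are below) =====
def Claim_equal_guess_records_status_py : Prop := ∀ (files : List String), Dom_guess_records_status_py files → Spec_guess_records_status_py files (guess_records_status_py files)

-- ===== LEMMAS AND PROOFS =====
-- proof-only abstraction of B's loop over arbitrary predicates
def glAux (p q r : String → Bool) : List String → Bool → Bool → String
  | [], m, a => if m then "mix" else if a then "production" else "idea"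
  | f :: rest, m, a =>
    if p f then "ready_for_release"
    else if q f then glAux p q r rest true a
    else if r f then glAux p q r rest m true
    else glAux p q r rest m a

theorem guessLoop_eq_glAux (files : List String) (m a : Bool) :
    guessLoop files m a =
      glAux (fun f => PySem.Str.isIn "master" (PySem.Str.lower f))
        (fun f => PySem.Str.isIn "mix" (PySem.Str.lower f))
        (fun f => PySem.Str.endswith (PySem.Str.lower f) ".wav" ||
          PySem.Str.endswith (PySem.Str.lower f) ".mp3" ||
          PySem.Str.endswith (PySem.Str.lower f) ".flac") files m a := by
  induction files generalizing m a with
  | nil => rfl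
  | cons f rest ih =>
    simp only [guessLoop, glAux]
    split_ifs <;> simp [ih]

theorem glAux_eq (p q r : String → Bool) (files : List String) (m a : Bool) :
    glAux p q r files m a =
      (if files.any p then "ready_for_release"
      else if m || files.any q then "mix"
      else if a || files.any r then "production"
      else "idea") := by
  induction files generalizing m a with
  | nil => simp [glAux]
  | cons f rest ih =>
    simp only [glAux, List.any_cons]
    obtain hp | hp := Bool.eq_false_or_eq_true (p f) <;>
      obtain hq | hq := Bool.eq_false_or_eq_true (q f) <;>
        obtain hr | hr := Bool.eq_false_or_eq_true (r f) <;>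
          cases m <;> cases a <;> simp [hp, hq, hr, ih]

-- ===== VERDICT (by name: the statement is the Claim_ definition above) =====
theorem guess_records_status_py_spec : Claim_equal_guess_records_status_py := by
  intro files _
  unfold Spec_guess_records_status_py guess_records_status_py guess_records_status_py_alt
  rw [guessLoop_eq_glAux, glAux_eq]
  simp [List.any_map, Function.comp]
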